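-- pv_equiv track=rewrite | github.com/ismpere/Python-Examples | Práctica 1/practice-python-1.py | leer_vertical
-- ===== SOURCE A (Python) =====
-- def leer_vertical(sopa,dim,num):
--     nuevo=""
--     contador=(dim+1)
--     mayor=num
--     for a in range(dim):
--         nuevo=""
--         for x in sopa:
--             if (contador==(dim+1)):
--                 nuevo=nuevo+x
--                 if (int(nuevo)%2 !=0 and int(nuevo)>int(mayor)):
--                     mayor= int(nuevo)
--                 contador=0
--             contador=(contador+1)
--     return mayor
-- ===== SOURCE B (Python) =====
-- def leer_vertical(sopa, dim, num):
--     mayor = num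
--     M = dim + 1
--     L = len(sopa)
--     for a in range(dim):
--         nuevo = ""
--         for x in range((-a * L) % M, L, M):
--             nuevo = nuevo + sopa[x]
--             v = int(nuevo)
--             if v % 2 != 0 and v > int(mayor):
--                 mayor = v
--     return mayor
-- ===== Notes on version B (the rewrite author's own statement) =====
-- stated objective: faster
-- what changed: A walks every cell of the dim x len(sopa) grid carrying a wrap-around counter to decide which cells to read; B jumps straight to the selected cells with a per-pass modular starting offset (-a*len) % (dim+1) and a strided range, touching only ~len(sopa) cells in total instead of dim*len(sopa).
-- outside the precondition, e.g. on leer_vertical(['1', 'ab', '3'], 1, 0): A returns 13, B returns 13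
import Mathlib
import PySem

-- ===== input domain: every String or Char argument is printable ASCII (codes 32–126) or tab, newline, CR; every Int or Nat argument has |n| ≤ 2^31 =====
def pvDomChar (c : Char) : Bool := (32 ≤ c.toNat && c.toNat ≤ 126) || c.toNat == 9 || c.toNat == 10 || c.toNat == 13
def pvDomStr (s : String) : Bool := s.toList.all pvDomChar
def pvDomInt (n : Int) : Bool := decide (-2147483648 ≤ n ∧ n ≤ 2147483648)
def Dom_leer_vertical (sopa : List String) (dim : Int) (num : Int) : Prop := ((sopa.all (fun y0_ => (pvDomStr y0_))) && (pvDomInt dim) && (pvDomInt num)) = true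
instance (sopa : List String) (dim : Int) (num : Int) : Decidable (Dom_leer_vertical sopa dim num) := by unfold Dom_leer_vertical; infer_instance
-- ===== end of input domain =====

-- B replaces A's scan of ALL dim*len(sopa) grid cells with a carried counter by, per pass,
-- a strided index range starting at (-a*len) % (dim+1), visiting only the selected cells.

-- the shared 'if int(nuevo)%2 != 0 and int(nuevo)>int(mayor): mayor = int(nuevo)' update
-- (int(nuevo) is PySem.Int.ofChars?; its value is only used under Pre_, where it is some;
--  int(mayor) is the identity on an int)
def pvUpd (nuevo : List Char) (mayor : Int) : Int :=
  let v := (PySem.Int.ofChars? nuevo).getD 0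
  if PySem.Int.mod v 2 ≠ 0 ∧ v > mayor then v else mayor

-- ===== PORT A =====
-- inner-loop body of A: state (nuevo, contador, mayor), element x
def pvStepA (M : Int) (t : List Char × Int × Int) (x : String) : List Char × Int × Int :=
  if t.2.1 = M then
    (t.1 ++ x.toList, ((0 : Int) + 1, pvUpd (t.1 ++ x.toList) t.2.2))
  else
    (t.1, (t.2.1 + 1, t.2.2))

def leer_vertical (sopa : List String) (dim : Int) (num : Int) : Int :=
  ((PySem.List.pyRange 0 dim 1).foldl
      (fun (st : Int × Int) _ => (sopa.foldl (pvStepA (dim + 1)) (([] : List Char), st)).2)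
      (dim + 1, num)).2

-- ===== PORT B =====
-- inner-loop body of B: state (nuevo, mayor), index x (always in range, so pyGetD's default is dead)
def pvStepB (sopa : List String) (t : List Char × Int) (x : Int) : List Char × Int :=
  (t.1 ++ (PySem.List.pyGetD sopa x "").toList,
   pvUpd (t.1 ++ (PySem.List.pyGetD sopa x "").toList) t.2)

def leer_vertical_alt (sopa : List String) (dim : Int) (num : Int) : Int :=
  (PySem.List.pyRange 0 dim 1).foldl
    (fun (mayor : Int) (a : Int) =>
      ((PySem.List.pyRange (PySem.Int.mod (-(a * PySem.List.len sopa)) (dim + 1))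
            (PySem.List.len sopa) (dim + 1)).foldl
          (pvStepB sopa) (([] : List Char), mayor)).2)
    num

-- ===== PRECONDITION & SPEC =====
-- Pre_ excludes the inputs on which int() raises ValueError in A.  It slightly narrows A's
-- returning set: when len(sopa) > dim+1 it asks every element to be a digit string, and when
-- len(sopa) ≤ dim+1 it asks every element (not only the ones actually selected) to be
-- int-parseable, although A also returns on some mixed lists whose garbage elements are
-- never selected.
def Pre_leer_vertical (sopa : List String) (dim : Int) (num : Int) : Prop :=
  dim ≤ 0 ∨ sopa = [] ∨
  (PySem.List.len sopa ≤ dim + 1 ∧ ∀ s ∈ sopa, (PySem.Int.ofStr? s).isSome = true) ∨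
  (∀ s ∈ sopa, PySem.Str.strIsdigit s = true)
instance (sopa : List String) (dim : Int) (num : Int) : Decidable (Pre_leer_vertical sopa dim num) := by unfold Pre_leer_vertical; infer_instance
def pvWitness_leer_vertical : List String × Int × Int := (["12", "3"], 2, 5)

def Spec_leer_vertical (sopa : List String) (dim : Int) (num : Int) (out : Int) : Prop := out = leer_vertical_alt sopa dim num
instance (sopa : List String) (dim : Int) (num : Int) (out : Int) : Decidable (Spec_leer_vertical sopa dim num out) := by unfold Spec_leer_vertical; infer_instance

-- ===== CLAIM (what is proved, stated in full; the proofs are below) =====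
def Claim_equal_leer_vertical : Prop := ∀ (sopa : List String) (dim : Int) (num : Int), Dom_leer_vertical sopa dim num → Pre_leer_vertical sopa dim num → Spec_leer_vertical sopa dim num (leer_vertical sopa dim num)

-- ===== LEMMAS AND PROOFS =====

-- the sublist of xs at indices ≡ r (counting down to the next selection; M = stride)
def pvSel (M : Int) : List String → Int → List String
  | [], _ => []
  | x :: xs, r => if r = 0 then x :: pvSel M xs (M - 1) else pvSel M xs (r - 1)

-- fold the append/update step over an already-selected list of strings
def pvProc : List String → (List Char × Int) → (List Char × Int)
  | [], t => t
  | s :: rest, t => pvProc rest (t.1 ++ s.toList, pvUpd (t.1 ++ s.toList) t.2)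

lemma pvRange_shift (r L M : Int) (hM : 0 < M) :
    PySem.List.pyRange (r + 1) (L + 1) M = (PySem.List.pyRange r L M).map (· + 1) := by
  rw [PySem.List.pyRange_of_pos _ _ hM, PySem.List.pyRange_of_pos _ _ hM, List.map_map]
  have hc : (if r + 1 < L + 1 then ((L + 1 - (r + 1) + M - 1) / M).toNat else 0)
      = (if r < L then ((L - r + M - 1) / M).toNat else 0) := by
    have h2 : L + 1 - (r + 1) = L - r := by ring
    rw [h2]
    by_cases h : r < L
    · rw [if_pos (by omega), if_pos h]
    · rw [if_neg (by omega), if_neg h]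
  rw [hc]
  apply List.map_congr_left
  intro k _
  simp only [Function.comp_apply]
  ring

lemma pvRange_zero_cons (L M : Int) (hM : 0 < M) (hL : 0 ≤ L) :
    PySem.List.pyRange 0 (L + 1) M = 0 :: (PySem.List.pyRange (M - 1) L M).map (· + 1) := by
  rw [PySem.List.pyRange_of_pos _ _ hM, PySem.List.pyRange_of_pos _ _ hM, List.map_map]
  have hq : 0 ≤ L / M := Int.ediv_nonneg hL (le_of_lt hM)
  have hn : (if (0 : Int) < L + 1 then ((L + 1 - 0 + M - 1) / M).toNat else 0)
      = (L / M).toNat + 1 := by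
    rw [if_pos (by omega)]
    have h1 : L + 1 - 0 + M - 1 = L + 1 * M := by ring
    rw [h1, Int.add_mul_ediv_right _ _ (by omega)]
    omega
  have hn' : (if M - 1 < L then ((L - (M - 1) + M - 1) / M).toNat else 0) = (L / M).toNat := by
    by_cases h : M - 1 < L
    · rw [if_pos h]
      congr 2
      ring
    · rw [if_neg h]
      have h0 : L / M = 0 := Int.ediv_eq_zero_of_lt hL (by omega)
      omega
  rw [hn, hn', List.range_succ_eq_map, List.map_cons, List.map_map]
  congr 1
  · simp
  apply List.map_congr_left
  intro k _
  simp only [Function.comp_apply, Nat.succ_eq_add_one]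
  push_cast
  ring

lemma pvAinner (M : Int) (hM : 0 < M) :
    ∀ (xs : List String) (r : Int), 0 ≤ r → r < M → ∀ (nuevo : List Char) (mayor : Int),
      xs.foldl (pvStepA M) (nuevo, (M - r, mayor)) =
        ((pvProc (pvSel M xs r) (nuevo, mayor)).1,
         (M - (r - (xs.length : Int)) % M, (pvProc (pvSel M xs r) (nuevo, mayor)).2)) := by
  intro xs
  induction xs with
  | nil =>
      intro r hr hrM nuevo mayor
      simp [pvSel, pvProc, Int.emod_eq_of_lt hr hrM]
  | cons x xs ih =>
      intro r hr hrM nuevo mayor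
      by_cases hr0 : r = 0
      · subst hr0
        rw [List.foldl_cons]
        have hstep : pvStepA M (nuevo, (M - 0, mayor)) x
            = (nuevo ++ x.toList, (M - (M - 1), pvUpd (nuevo ++ x.toList) mayor)) := by
          simp [pvStepA]
          try omega
        rw [hstep, ih (M - 1) (by omega) (by omega)]
        have hsel : pvSel M (x :: xs) 0 = x :: pvSel M xs (M - 1) := by simp [pvSel]
        have hmod : (M - 1 - (xs.length : Int)) % M = (0 - ((x :: xs).length : Int)) % M := by
          have h1 : M - 1 - (xs.length : Int) = (0 - ((x :: xs).length : Int)) + M * 1 := by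
            simp [List.length_cons]
            ring
          rw [h1, Int.add_mul_emod_self_left]
        rw [hsel, hmod]
        simp [pvProc]
      · rw [List.foldl_cons]
        have hstep : pvStepA M (nuevo, (M - r, mayor)) x = (nuevo, (M - (r - 1), mayor)) := by
          have : ¬ (M - r = M) := by omega
          simp [pvStepA, this]
          ring
        rw [hstep, ih (r - 1) (by omega) (by omega)]
        have hsel : pvSel M (x :: xs) r = pvSel M xs (r - 1) := by simp [pvSel, hr0]
        have hmod : (r - 1 - (xs.length : Int)) % M = (r - ((x :: xs).length : Int)) % M := by
          congr 1
          simp [List.length_cons]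
          ring
        rw [hsel, hmod]

lemma pvBinner (M : Int) (hM : 0 < M) :
    ∀ (xs : List String) (r : Int), 0 ≤ r → ∀ (t : List Char × Int),
      (PySem.List.pyRange r (xs.length : Int) M).foldl (pvStepB xs) t
        = pvProc (pvSel M xs r) t := by
  intro xs
  induction xs with
  | nil =>
      intro r hr t
      rw [PySem.List.pyRange_of_pos _ _ hM, if_neg (by simp; omega)]
      simp [pvSel, pvProc]
  | cons x xs ih =>
      intro r hr t
      have hlen : (((x :: xs).length : Nat) : Int) = (xs.length : Int) + 1 := by
        simp [List.length_cons]
      rw [hlen]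
      by_cases hr0 : r = 0
      · subst hr0
        rw [pvRange_zero_cons _ _ hM (by positivity), List.foldl_cons, List.foldl_map]
        have hstep : pvStepB (x :: xs) t 0 = (t.1 ++ x.toList, pvUpd (t.1 ++ x.toList) t.2) := by
          simp [pvStepB, PySem.List.pyGetD_zero_cons]
        rw [hstep]
        have hcongr : ∀ (acc : List Char × Int), ∀ j ∈ PySem.List.pyRange (M - 1) (xs.length : Int) M,
            pvStepB (x :: xs) acc (j + 1) = pvStepB xs acc j := by
          intro acc j hj
          have hj0 : 0 ≤ j := by
            have := (PySem.List.mem_pyRange_iff_of_pos hM j).mp hj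
            omega
          have hget : PySem.List.pyGetD (x :: xs) (j + 1) "" = PySem.List.pyGetD xs j "" := by
            rw [PySem.List.pyGetD_of_nonneg _ _ (by omega), PySem.List.pyGetD_of_nonneg _ _ hj0]
            have h1 : (j + 1).toNat = j.toNat + 1 := by omega
            rw [h1]
            simp [List.getD]
          simp [pvStepB, hget]
        rw [PySem.List.foldl_congr_mem _ _ _ _ hcongr, ih (M - 1) (by omega)]
        have hsel : pvSel M (x :: xs) 0 = x :: pvSel M xs (M - 1) := by simp [pvSel]
        rw [hsel]
        simp [pvProc]
      · have hr1 : r = (r - 1) + 1 := by ring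
        rw [hr1, pvRange_shift _ _ _ hM, List.foldl_map]
        have hcongr : ∀ (acc : List Char × Int), ∀ j ∈ PySem.List.pyRange (r - 1) (xs.length : Int) M,
            pvStepB (x :: xs) acc (j + 1) = pvStepB xs acc j := by
          intro acc j hj
          have hj0 : 0 ≤ j := by
            have := (PySem.List.mem_pyRange_iff_of_pos hM j).mp hj
            omega
          have hget : PySem.List.pyGetD (x :: xs) (j + 1) "" = PySem.List.pyGetD xs j "" := by
            rw [PySem.List.pyGetD_of_nonneg _ _ (by omega), PySem.List.pyGetD_of_nonneg _ _ hj0]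
            have h1 : (j + 1).toNat = j.toNat + 1 := by omega
            rw [h1]
            simp [List.getD]
          simp [pvStepB, hget]
        rw [PySem.List.foldl_congr_mem _ _ _ _ hcongr, ih (r - 1) (by omega)]
        have hsel : pvSel M (x :: xs) r = pvSel M xs (r - 1) := by simp [pvSel, hr0]
        have hr2 : r - 1 + 1 = r := by ring
        rw [hr2, hsel]

lemma pvOuter (sopa : List String) (dim : Int) :
    ∀ (n : Nat) (a : Int), 0 ≤ a → dim = a + n → ∀ (mayor : Int),
      ((PySem.List.pyRange a dim 1).foldl
          (fun (st : Int × Int) _ => (sopa.foldl (pvStepA (dim + 1)) (([] : List Char), st)).2)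
          ((dim + 1) - PySem.Int.mod (-(a * PySem.List.len sopa)) (dim + 1), mayor)).2
        = (PySem.List.pyRange a dim 1).foldl
            (fun (mayor : Int) (a : Int) =>
              ((PySem.List.pyRange (PySem.Int.mod (-(a * PySem.List.len sopa)) (dim + 1))
                    (PySem.List.len sopa) (dim + 1)).foldl
                  (pvStepB sopa) (([] : List Char), mayor)).2)
            mayor := by
  intro n
  induction n with
  | zero =>
      intro a ha hdim mayor
      rw [PySem.List.pyRange_one_eq_nil (by omega)]
      simp
  | succ n ih =>
      intro a ha hdim mayor
      have hM : 0 < dim + 1 := by omega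
      have hlt : a < dim := by omega
      rw [PySem.List.pyRange_one_cons hlt, List.foldl_cons, List.foldl_cons]
      set L : Int := (sopa.length : Int) with hL
      have hlen : PySem.List.len sopa = L := PySem.List.len_eq sopa
      have hr : PySem.Int.mod (-(a * PySem.List.len sopa)) (dim + 1) = (-(a * L)) % (dim + 1) := by
        rw [hlen, PySem.Int.mod_eq_emod_of_pos hM]
      have hr0 : 0 ≤ (-(a * L)) % (dim + 1) := Int.emod_nonneg _ (by omega)
      have hrM : (-(a * L)) % (dim + 1) < dim + 1 := Int.emod_lt_of_pos _ hM
      -- A's pass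
      have hA := pvAinner (dim + 1) hM sopa ((-(a * L)) % (dim + 1)) hr0 hrM [] mayor
      have hA' : (sopa.foldl (pvStepA (dim + 1))
            (([] : List Char), ((dim + 1) - PySem.Int.mod (-(a * PySem.List.len sopa)) (dim + 1), mayor))).2
          = ((dim + 1) - ((-(a * L)) % (dim + 1) - L) % (dim + 1),
             (pvProc (pvSel (dim + 1) sopa ((-(a * L)) % (dim + 1))) ([], mayor)).2) := by
        rw [hr, hA]
      -- B's pass
      have hB : ((PySem.List.pyRange (PySem.Int.mod (-(a * PySem.List.len sopa)) (dim + 1))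
              (PySem.List.len sopa) (dim + 1)).foldl (pvStepB sopa) (([] : List Char), mayor)).2
          = (pvProc (pvSel (dim + 1) sopa ((-(a * L)) % (dim + 1))) ([], mayor)).2 := by
        rw [hr, hlen, pvBinner (dim + 1) hM sopa _ hr0]
      rw [hA', hB]
      -- counter carried into the next pass
      have hmod : ((-(a * L)) % (dim + 1) - L) % (dim + 1) = (-((a + 1) * L)) % (dim + 1) := by
        have h1 : -((a + 1) * L) = -(a * L) - L := by ring
        rw [h1, Int.sub_emod (-(a * L)) L, Int.sub_emod ((-(a * L)) % (dim + 1)) L,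
          Int.emod_emod_of_dvd _ dvd_rfl]
      have hr' : PySem.Int.mod (-((a + 1) * PySem.List.len sopa)) (dim + 1)
          = (-((a + 1) * L)) % (dim + 1) := by
        rw [hlen, PySem.Int.mod_eq_emod_of_pos hM]
      rw [hmod]
      have := ih (a + 1) (by omega) (by omega)
        ((pvProc (pvSel (dim + 1) sopa ((-(a * L)) % (dim + 1))) ([], mayor)).2)
      rw [hr'] at this
      exact this

-- ===== VERDICT (by name: the statement is the Claim_ definition above) =====
theorem leer_vertical_spec : Claim_equal_leer_vertical := by
  unfold Claim_equal_leer_vertical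
  intro sopa dim num _hdom _hpre
  unfold Spec_leer_vertical leer_vertical leer_vertical_alt
  by_cases hd : dim ≤ 0
  · rw [PySem.List.pyRange_one_eq_nil hd]
    simp
  · have h0 : dim = 0 + ((dim.toNat : Nat) : Int) := by omega
    have H := pvOuter sopa dim dim.toNat 0 (le_refl 0) h0 num
    have hz : PySem.Int.mod (-(0 * PySem.List.len sopa)) (dim + 1) = 0 := by
      rw [PySem.Int.mod_eq_emod_of_pos (by omega)]
      simp
    rw [hz] at H
    simpa using H
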